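-- pv_equiv track=rewrite | github.com/paras-a/Data-Structures-and-Algorithms | recursion.py | product_odd
-- ===== SOURCE A (Python) =====
-- def product_odd(n):
--     """
--     Calculate the product of odd numbers from 1 to n using recursion.
--
--     @param n: A positive integer
--     @return: The product of odd numbers from 1 to n
--     @rtype: int
--
--     Examples:
--         >>> product_odd(5)
--         15
--         >>> product_odd(4)
--         3
--     """
--     if n <= 0:
--         raise ValueError("n must be a non-negative integer")
--     if n == 1:
--         return n
--     product = 1
--     if n % 2 != 0:
--         product *= n
--     return product * product_odd(n-1)
-- ===== SOURCE B (Python) =====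
-- def product_odd(n):
--     if n <= 0:
--         raise ValueError("n must be a non-negative integer")
--     product = 1
--     for i in range(1, n + 1, 2):
--         product *= i
--     return product
-- ===== Notes on version B (the rewrite author's own statement) =====
-- stated objective: simpler
-- what changed: Replaces the count-down recursion that visits every integer from n to 1 and conditionally multiplies the odd ones with a single forward loop over range(1, n+1, 2) that touches only the odd numbers.
import Mathlib
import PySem

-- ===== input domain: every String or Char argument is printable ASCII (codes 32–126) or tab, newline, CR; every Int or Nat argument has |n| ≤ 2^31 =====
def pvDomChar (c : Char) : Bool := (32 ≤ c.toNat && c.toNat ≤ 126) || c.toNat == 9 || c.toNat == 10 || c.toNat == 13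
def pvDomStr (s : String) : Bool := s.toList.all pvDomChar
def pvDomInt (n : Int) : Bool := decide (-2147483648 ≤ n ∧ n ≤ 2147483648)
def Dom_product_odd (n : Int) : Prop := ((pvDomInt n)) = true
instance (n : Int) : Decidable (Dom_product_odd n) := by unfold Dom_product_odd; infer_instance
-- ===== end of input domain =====

-- B replaces A's count-down recursion (multiplying only at odd values) with a single
-- forward loop over range(1, n+1, 2); same values, simpler decomposition (not measured faster).


-- ===== PORT A =====
-- A raises ValueError on n ≤ 0; the port returns 0 there and Pre_ excludes those inputs.
def product_odd (n : Int) : Int :=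
  if _h0 : n ≤ 0 then 0
  else if n = 1 then n
  else (if PySem.Int.mod n 2 ≠ 0 then n else 1) * product_odd (n - 1)
termination_by n.toNat
decreasing_by omega

-- ===== PORT B =====
-- B raises ValueError on n ≤ 0 too; the port returns 0 there and Pre_ excludes those inputs.
def product_odd_alt (n : Int) : Int :=
  if n ≤ 0 then 0
  else (PySem.List.pyRange 1 (n + 1) 2).foldl (· * ·) 1

-- ===== PRECONDITION & SPEC =====
-- Pre_ excludes exactly n ≤ 0, where both Pythons raise ValueError.
def Pre_product_odd (n : Int) : Prop := 1 ≤ n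
instance (n : Int) : Decidable (Pre_product_odd n) := by unfold Pre_product_odd; infer_instance
def pvWitness_product_odd : Int := 5

def Spec_product_odd (n : Int) (out : Int) : Prop := out = product_odd_alt n
instance (n : Int) (out : Int) : Decidable (Spec_product_odd n out) := by unfold Spec_product_odd; infer_instance

-- ===== CLAIM (what is proved, stated in full; the proofs are below) =====
def Claim_equal_product_odd : Prop := ∀ (n : Int), Dom_product_odd n → Pre_product_odd n → Spec_product_odd n (product_odd n)

-- ===== LEMMAS AND PROOFS =====

-- the product of the first m odd integers, as B's fold computes it
def oddProd (m : Nat) : Int := ((List.range m).map (fun k => (1 : Int) + 2 * k)).foldl (· * ·) 1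

theorem oddProd_succ (m : Nat) : oddProd (m + 1) = oddProd m * (1 + 2 * m) := by
  simp [oddProd, List.range_succ]

theorem alt_eq_oddProd (n : Int) (h : 1 ≤ n) :
    product_odd_alt n = oddProd ((n + 1) / 2).toNat := by
  unfold product_odd_alt oddProd
  rw [if_neg (by omega), PySem.List.pyRange_of_pos 1 (n + 1) (by norm_num)]
  have : ((n + 1 - 1 + 2 - 1) / 2).toNat = ((n + 1) / 2).toNat := by omega
  rw [if_pos (by omega), this]
  simp [← List.map_eq_flatMap, List.map_map, Function.comp_def]

theorem a_eq_oddProd (n : Int) (h : 1 ≤ n) :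
    product_odd n = oddProd ((n + 1) / 2).toNat := by
  induction n, h using Int.le_induction with
  | base =>
      rw [product_odd]
      norm_num
      decide
  | succ n hn ih =>
      rw [product_odd]
      rw [dif_neg (by omega : ¬ (n + 1 ≤ 0)), if_neg (by omega : ¬ (n + 1 = 1))]
      have e : n + 1 - 1 = n := by ring
      rw [e, ih]
      rcases Int.even_or_odd n with he | ho
      · -- n even, so n+1 is odd: the range gains the element n+1
        obtain ⟨t, ht⟩ := he
        have hmod : PySem.Int.mod (n + 1) 2 ≠ 0 := by
          rw [PySem.Int.mod_eq_emod_of_pos (by norm_num : (0:Int) < 2)]; omega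
        rw [if_pos hmod]
        have h1 : ((n + 1 + 1) / 2).toNat = ((n + 1) / 2).toNat + 1 := by omega
        have h2 : (1 : Int) + 2 * (((n + 1) / 2).toNat : Int) = n + 1 := by
          have : (((n + 1) / 2).toNat : Int) = (n + 1) / 2 := by omega
          omega
        rw [h1, oddProd_succ, h2, mul_comm]
      · -- n odd, so n+1 is even: same range, factor 1
        obtain ⟨t, ht⟩ := ho
        have hmod : ¬ PySem.Int.mod (n + 1) 2 ≠ 0 := by
          rw [PySem.Int.mod_eq_emod_of_pos (by norm_num : (0:Int) < 2)]; omega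
        rw [if_neg hmod]
        have h1 : ((n + 1 + 1) / 2).toNat = ((n + 1) / 2).toNat := by omega
        rw [h1, one_mul]

-- ===== VERDICT (by name: the statement is the Claim_ definition above) =====
theorem product_odd_spec : Claim_equal_product_odd := by
  intro n _ hpre
  unfold Spec_product_odd
  rw [a_eq_oddProd n hpre, alt_eq_oddProd n hpre]
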